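-- pv_equiv track=rewrite | github.com/GregoryMorse/sudoku | sudoku.py | has_mutex_digit_sum
-- ===== SOURCE A (Python) =====
-- def has_mutex_digit_sum(total, value_sets, used_values):
--   #get_all_mutex_digit_sum_sets(43, [[x for x in range(2, 10)] for _ in range(7)], set((1,)))
--   def has_mutex_digit_sum_inner(total, value_sets, used_values):
--     if len(value_sets) == 1: return True if total in value_sets[0] and not total in used_values else False
--     if total < 0: return False
--     for y in value_sets[0]:
--       if not y in used_values:
--         if has_mutex_digit_sum_inner(total - y, value_sets[1:], used_values | set((y,))): return True
--     return False
--   return has_mutex_digit_sum_inner(total, value_sets, used_values)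
-- ===== SOURCE B (Python) =====
-- def has_mutex_digit_sum(total, value_sets, used_values):
--     # Forward level-by-level search: maintain the set of distinct reachable
--     # states (remaining total, used values) instead of backtracking over
--     # every choice path; identical states are merged instead of re-explored.
--     states = {(total, tuple(sorted(set(used_values))))}
--     for s in value_sets[:-1]:
--         nxt = set()
--         for (r, used) in states:
--             if r < 0:
--                 continue
--             for y in sorted(set(s)):
--                 if y not in used:
--                     nxt.add((r - y, tuple(sorted(used + (y,)))))
--         states = nxt
--     last = value_sets[-1]
--     return any(r in last and r not in used for (r, used) in states)
-- ===== Notes on version B (the rewrite author's own statement) =====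
-- stated objective: alternative
-- what changed: Replaces A's recursive depth-first backtracking over individual choice paths by an iterative level-by-level forward search over a deduplicated set of (remaining total, used-values) states; it merges duplicate states instead of re-exploring them (helpful on repeated-value inputs like the repository's sudoku call) but gives up DFS's early exit.
-- outside the precondition, e.g. on has_mutex_digit_sum(-5, [], {1}): A returns False, B raises IndexError; on has_mutex_digit_sum(5, [], {1}): A raises IndexError, B raises IndexError
import Mathlib
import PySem

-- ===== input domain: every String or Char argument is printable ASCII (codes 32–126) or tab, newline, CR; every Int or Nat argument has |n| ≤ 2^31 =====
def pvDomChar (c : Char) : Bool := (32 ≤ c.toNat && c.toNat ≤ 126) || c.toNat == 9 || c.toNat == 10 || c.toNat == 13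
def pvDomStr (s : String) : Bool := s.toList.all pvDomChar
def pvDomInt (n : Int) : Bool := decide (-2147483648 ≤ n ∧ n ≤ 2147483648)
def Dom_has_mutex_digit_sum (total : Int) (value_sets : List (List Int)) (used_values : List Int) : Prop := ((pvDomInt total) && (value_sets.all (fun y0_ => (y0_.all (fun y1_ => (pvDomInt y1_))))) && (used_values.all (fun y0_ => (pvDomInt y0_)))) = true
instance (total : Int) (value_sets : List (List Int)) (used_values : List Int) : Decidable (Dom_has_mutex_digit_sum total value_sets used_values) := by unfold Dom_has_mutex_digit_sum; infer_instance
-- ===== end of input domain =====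

-- B replaces A's recursive backtracking over choice paths by a level-by-level
-- forward search over the set of distinct (remaining total, used values) states,
-- merging identical states instead of re-exploring them (objective: alternative).

-- ===== PORT A =====
-- A's inner recursion: used_values is a Python set (PySem.Set Int as a list of
-- distinct elements); `used_values | set((y,))` is Set.union.
def has_mutex_digit_sum_inner (total : Int) (value_sets : List (List Int)) (used_values : PySem.Set Int) : Bool :=
  match value_sets with
  | [] => false  -- unreachable under Pre_: Python raises IndexError on []
  | [s] => s.contains total && !(used_values.contains total)
  | s :: s1 :: rest =>
    if total < 0 then false
    else s.any (fun y =>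
      !(used_values.contains y) &&
      has_mutex_digit_sum_inner (total - y) (s1 :: rest) (PySem.Set.union used_values [y]))
termination_by value_sets.length
decreasing_by simp

def has_mutex_digit_sum (total : Int) (value_sets : List (List Int)) (used_values : List Int) : Bool :=
  has_mutex_digit_sum_inner total value_sets used_values

-- ===== PORT B =====
-- tuple(sorted(used + (y,)))
def pvAltIns (u : List Int) (y : Int) : List Int := PySem.List.sorted (u ++ [y]) (fun x => x) false

-- body of B's middle loop: expand one state (r, used) into nxt
def pvAltExpand (s : List Int) (nxt : PySem.Set (Int × List Int)) (ru : Int × List Int) : PySem.Set (Int × List Int) :=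
  if ru.1 < 0 then nxt
  else (PySem.List.sorted (PySem.Set.ofList s) (fun x => x) false).foldl
    (fun n2 y => if ru.2.contains y then n2 else PySem.Set.add n2 (ru.1 - y, pvAltIns ru.2 y)) nxt

-- one iteration of B's outer loop over value_sets[:-1]
def pvAltStep (states : PySem.Set (Int × List Int)) (s : List Int) : PySem.Set (Int × List Int) :=
  states.foldl (pvAltExpand s) PySem.Set.empty

def has_mutex_digit_sum_alt (total : Int) (value_sets : List (List Int)) (used_values : List Int) : Bool :=
  match value_sets.getLast? with
  | none => false  -- unreachable under Pre_: Python raises IndexError on value_sets[-1]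
  | some last =>
    let base := PySem.List.sorted (PySem.Set.ofList used_values) (fun x => x) false
    let states := (value_sets.dropLast).foldl pvAltStep (PySem.Set.ofList [(total, base)])
    states.any (fun ru => last.contains ru.1 && !(ru.2.contains ru.1))

-- ===== PRECONDITION & SPEC =====
-- Pre_ excludes only empty value_sets, outside the function's natural domain: there A
-- raises IndexError when total >= 0 and only falls through to an accidental False when
-- total < 0, while B (indexing value_sets[-1]) always raises IndexError.
def Pre_has_mutex_digit_sum (_total : Int) (value_sets : List (List Int)) (_used_values : List Int) : Prop := value_sets ≠ []
instance (total : Int) (value_sets : List (List Int)) (used_values : List Int) : Decidable (Pre_has_mutex_digit_sum total value_sets used_values) := by unfold Pre_has_mutex_digit_sum; infer_instance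
def pvWitness_has_mutex_digit_sum : Int × List (List Int) × List Int := (3, [[1, 2], [1, 2]], [])
def Spec_has_mutex_digit_sum (total : Int) (value_sets : List (List Int)) (used_values : List Int) (out : Bool) : Prop := out = has_mutex_digit_sum_alt total value_sets used_values
instance (total : Int) (value_sets : List (List Int)) (used_values : List Int) (out : Bool) : Decidable (Spec_has_mutex_digit_sum total value_sets used_values out) := by unfold Spec_has_mutex_digit_sum; infer_instance

-- ===== CLAIM (what is proved, stated in full; the proofs are below) =====
def Claim_equal_has_mutex_digit_sum : Prop := ∀ (total : Int) (value_sets : List (List Int)) (used_values : List Int), Dom_has_mutex_digit_sum total value_sets used_values → Pre_has_mutex_digit_sum total value_sets used_values → Spec_has_mutex_digit_sum total value_sets used_values (has_mutex_digit_sum total value_sets used_values)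

-- ===== LEMMAS AND PROOFS =====

-- A's recursion only looks at the MEMBERSHIP of the used set.
theorem pv_inner_congr : ∀ (value_sets : List (List Int)) (total : Int) (u1 u2 : PySem.Set Int),
    (∀ x : Int, x ∈ u1 ↔ x ∈ u2) →
    has_mutex_digit_sum_inner total value_sets u1 = has_mutex_digit_sum_inner total value_sets u2
  | [], t, u1, u2, h => by simp [has_mutex_digit_sum_inner]
  | [s], t, u1, u2, h => by
    simp [has_mutex_digit_sum_inner, List.contains_eq_mem, h t]
  | s :: s1 :: rest, t, u1, u2, h => by
    simp only [has_mutex_digit_sum_inner]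
    split
    · rfl
    · refine List.any_congr rfl (fun y => ?_)
      rw [pv_inner_congr (s1 :: rest) (t - y) (PySem.Set.union u1 [y]) (PySem.Set.union u2 [y])
            (fun x => by simp [PySem.Set.mem_union, h x])]
      simp [List.contains_eq_mem, h y]

-- any over Set.add
theorem pv_any_add {β : Type} [BEq β] [LawfulBEq β] (s : PySem.Set β) (x : β) (g : β → Bool) :
    (PySem.Set.add s x).any g = (s.any g || g x) := by
  by_cases hx : x ∈ s
  · rw [PySem.Set.add_of_mem hx]
    cases hgx : g x
    · simp
    · simp only [Bool.or_true]
      exact Bool.eq_iff_iff.mpr ⟨fun _ => rfl, fun _ => List.any_eq_true.mpr ⟨x, hx, hgx⟩⟩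
  · rw [PySem.Set.add_of_not_mem hx]
    simp [List.any_append]

-- any over B's inner fold (the loop over sorted(set(s)))
theorem pv_any_inner_fold (ys : List Int) (r : Int) (u : List Int)
    (acc : PySem.Set (Int × List Int)) (g : Int × List Int → Bool) :
    (ys.foldl (fun n2 y => if u.contains y then n2 else PySem.Set.add n2 (r - y, pvAltIns u y)) acc).any g
      = (acc.any g || ys.any (fun y => !(u.contains y) && g (r - y, pvAltIns u y))) := by
  induction ys generalizing acc with
  | nil => simp
  | cons y ys ih =>
    rw [List.foldl_cons, List.any_cons]
    by_cases hy : u.contains y = true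
    · rw [if_pos hy, ih, hy]
      simp
    · rw [if_neg hy, ih, pv_any_add, Bool.or_assoc]
      rw [eq_false_of_ne_true hy]
      simp

-- any over one outer-loop step of B
theorem pv_any_step (s : List Int) (states acc : PySem.Set (Int × List Int)) (g : Int × List Int → Bool) :
    (states.foldl (pvAltExpand s) acc).any g
      = (acc.any g || states.any (fun ru =>
          if ru.1 < 0 then false
          else (PySem.List.sorted (PySem.Set.ofList s) (fun x => x) false).any
            (fun y => !(ru.2.contains y) && g (ru.1 - y, pvAltIns ru.2 y)))) := by
  induction states generalizing acc with
  | nil => simp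
  | cons ru states ih =>
    simp only [List.foldl_cons, List.any_cons]
    rw [ih]
    by_cases h : ru.1 < 0
    · simp [pvAltExpand, h]
    · rw [if_neg h]
      unfold pvAltExpand
      rw [if_neg h, pv_any_inner_fold, Bool.or_assoc]

-- expanding one state computes exactly A's recursion at that state
theorem pv_state_inner (s r0 : List Int) (rest : List (List Int)) (r : Int) (u : PySem.Set Int) :
    (if r < 0 then false
     else (PySem.List.sorted (PySem.Set.ofList s) (fun x => x) false).any
       (fun y => !(u.contains y) && has_mutex_digit_sum_inner (r - y) (r0 :: rest) (pvAltIns u y)))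
    = has_mutex_digit_sum_inner r (s :: r0 :: rest) u := by
  conv_rhs => rw [has_mutex_digit_sum_inner]
  split
  · rfl
  · apply Bool.eq_iff_iff.mpr
    simp only [List.any_eq_true, PySem.List.mem_sorted, PySem.Set.mem_ofList]
    constructor
    · rintro ⟨y, hy, hb⟩
      refine ⟨y, hy, ?_⟩
      rwa [pv_inner_congr _ _ _ (PySem.Set.union u [y]) (fun x => by
        simp [pvAltIns, PySem.List.mem_sorted, PySem.Set.mem_union])] at hb
    · rintro ⟨y, hy, hb⟩
      refine ⟨y, hy, ?_⟩
      rwa [pv_inner_congr _ _ _ (PySem.Set.union u [y]) (fun x => by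
        simp [pvAltIns, PySem.List.mem_sorted, PySem.Set.mem_union])]

-- main invariant: after folding B's outer loop over `pre`, the final `any`
-- equals the disjunction of A's recursion over the current states.
theorem pv_loop_any (last : List Int) (pre : List (List Int)) :
    ∀ states : PySem.Set (Int × List Int),
      ((pre.foldl pvAltStep states).any (fun ru => last.contains ru.1 && !(ru.2.contains ru.1)))
        = states.any (fun ru => has_mutex_digit_sum_inner ru.1 (pre ++ [last]) ru.2) := by
  induction pre with
  | nil =>
    intro states
    refine List.any_congr rfl (fun ru => ?_)
    simp [has_mutex_digit_sum_inner]
  | cons s pre ih =>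
    intro states
    simp only [List.foldl_cons]
    rw [ih, pvAltStep, pv_any_step]
    simp only [PySem.Set.empty, List.any_nil, Bool.false_or]
    refine List.any_congr rfl (fun ru => ?_)
    rcases hpre : pre ++ [last] with _ | ⟨r0, rest⟩
    · exact absurd hpre (by simp)
    · rw [List.cons_append, hpre]
      exact pv_state_inner s r0 rest ru.1 ru.2

-- ===== VERDICT (by name: the statement is the Claim_ definition above) =====
theorem has_mutex_digit_sum_spec : Claim_equal_has_mutex_digit_sum := by
  intro total value_sets used_values _ hpre
  unfold Spec_has_mutex_digit_sum has_mutex_digit_sum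
  rcases List.eq_nil_or_concat value_sets with h | ⟨ys, last, h⟩
  · exact absurd h hpre
  · subst h
    simp only [List.concat_eq_append] at *
    simp only [has_mutex_digit_sum_alt, List.getLast?_concat, List.dropLast_concat]
    rw [pv_loop_any]
    have hone : PySem.Set.ofList
        [((total : Int), PySem.List.sorted (PySem.Set.ofList used_values) (fun x => x) false)]
        = [(total, PySem.List.sorted (PySem.Set.ofList used_values) (fun x => x) false)] := rfl
    rw [hone]
    simp only [List.any_cons, List.any_nil, Bool.or_false]
    exact (pv_inner_congr _ _ _ _ (fun x => by
      simp [PySem.List.mem_sorted, PySem.Set.mem_ofList])).symm
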